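-- pv_equiv track=rewrite | github.com/pypi-data/pypi-mirror-390 | packages/py-block-diagram/py_block_diagram-1.6.3.tar.gz/py_block_diagram-1.6.3/py_block_diagram/__init__.py | fix_one_delimiter
-- ===== SOURCE A (Python) =====
-- def fix_one_delimiter(mylist, delim='[',close_delim=']'):
--     outlist = []
--     i = 0
--     N = len(mylist)
--     while (i < N):
--         item = mylist[i]
--         if delim in item and close_delim not in item:
--             # keeping adding the next item until the match
--             # happens
--             while close_delim not in item:
--                 i += 1
--                 item += ',' + mylist[i]
--         outlist.append(item)
--         i += 1
--     return outlist
-- ===== SOURCE B (Python) =====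
-- def fix_one_delimiter(mylist, delim='[', close_delim=']'):
--     # right-to-left single pass: build the result back-to-front; an opening item
--     # merges with the most recently built entries until the accumulator closes
--     out = []  # holds the already-built tail of the result, in reversed order
--     for item in reversed(mylist):
--         if delim in item and close_delim not in item:
--             acc = item
--             while close_delim not in acc:
--                 acc += ',' + out.pop()
--             out.append(acc)
--         else:
--             out.append(item)
--     out.reverse()
--     return out
-- ===== Notes on version B (the rewrite author's own statement) =====
-- stated objective: alternative
-- what changed: Replaces the index-based outer while with a nested fast-forwarding inner while by a single right-to-left pass that builds the result back-to-front, merging an opening item with the most recently built entries until the accumulator contains the closing delimiter.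
-- outside the precondition, e.g. on fix_one_delimiter(['A]]', 'A]', '', ''], ']', ','): A returns ['A]],A]', '', ''], B returns ['A]],A],', '']
import Mathlib
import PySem

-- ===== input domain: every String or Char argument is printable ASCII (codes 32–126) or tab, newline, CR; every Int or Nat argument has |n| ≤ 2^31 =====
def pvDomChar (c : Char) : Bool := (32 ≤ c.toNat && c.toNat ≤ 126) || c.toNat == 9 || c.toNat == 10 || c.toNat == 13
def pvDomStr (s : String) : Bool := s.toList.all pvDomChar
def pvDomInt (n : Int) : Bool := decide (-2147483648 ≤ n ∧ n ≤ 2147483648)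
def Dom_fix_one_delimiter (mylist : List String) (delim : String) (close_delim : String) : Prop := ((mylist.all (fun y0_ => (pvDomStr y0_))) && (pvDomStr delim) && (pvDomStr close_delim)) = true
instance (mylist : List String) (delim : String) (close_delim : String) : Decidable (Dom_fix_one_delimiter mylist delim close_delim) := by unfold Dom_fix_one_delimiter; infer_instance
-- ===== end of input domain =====

-- B replaces A's index-based outer while with nested fast-forwarding inner while by a single
-- right-to-left fold that merges an opening item with the heads of the already-built output
-- (objective: alternative decomposition, same cost).

-- ===== PORT A =====
-- inner 'while close_delim not in item: i += 1; item += ',' + mylist[i]';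
-- the branch reached when i+1 is out of range is where Python raises IndexError (excluded by Pre_)
def fixA_merge (mylist : List String) (close_delim : String) (item : String) (i : Nat) : String × Nat :=
  if PySem.Str.isIn close_delim item then (item, i)
  else if h : i + 1 < mylist.length then
    fixA_merge mylist close_delim (item ++ "," ++ mylist[i+1]) (i + 1)
  else (item, mylist.length + i)
termination_by mylist.length - i

theorem fixA_merge_ge (mylist : List String) (close_delim : String) (item : String) (i : Nat) :
    i ≤ (fixA_merge mylist close_delim item i).2 := by
  fun_induction fixA_merge <;> simp_all <;> omega

-- outer 'while i < N' loop carrying outlist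
def fixA_loop (mylist : List String) (delim : String) (close_delim : String) (i : Nat)
    (outlist : List String) : List String :=
  if h : i < mylist.length then
    if PySem.Str.isIn delim (mylist[i]) && !PySem.Str.isIn close_delim (mylist[i]) then
      fixA_loop mylist delim close_delim ((fixA_merge mylist close_delim mylist[i] i).2 + 1)
        (outlist ++ [(fixA_merge mylist close_delim mylist[i] i).1])
    else
      fixA_loop mylist delim close_delim (i + 1) (outlist ++ [mylist[i]])
  else outlist
termination_by mylist.length - i
decreasing_by
  · have := fixA_merge_ge mylist close_delim mylist[i] i; omega
  · omega

def fix_one_delimiter (mylist : List String) (delim : String) (close_delim : String) : List String :=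
  fixA_loop mylist delim close_delim 0 []

-- ===== PORT B =====
-- Source B keeps 'out' in reversed order and pops/appends at its end; the port represents that same
-- list by its reversal (the result built so far, in order), so pop() = head, append = cons, and
-- the final out.reverse() is the identity.  'acc += ',' + out.pop()' loop; the out = [] branch
-- is where Python B raises IndexError (excluded by Pre_)
def fixB_merge (close_delim : String) (acc : String) (out : List String) : String × List String :=
  if PySem.Str.isIn close_delim acc then (acc, out)
  else match out with
    | [] => (acc, [])
    | g :: rest => fixB_merge close_delim (acc ++ "," ++ g) rest
termination_by out.length

def fix_one_delimiter_alt (mylist : List String) (delim : String) (close_delim : String) : List String :=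
  mylist.foldr (fun item out =>
    if PySem.Str.isIn delim item && !PySem.Str.isIn close_delim item then
      (fixB_merge close_delim item out).1 :: (fixB_merge close_delim item out).2
    else item :: out) []

-- ===== PRECONDITION & SPEC =====
-- every item that opens a group (contains delim, not close_delim) is closed by a later item
def GoodL (delim : String) (close_delim : String) (l : List String) : Prop :=
  ∀ i < l.length,
    (PySem.Str.isIn delim (l.getD i "") = true ∧ PySem.Str.isIn close_delim (l.getD i "") = false) →
    ∃ j < l.length, i < j ∧ PySem.Str.isIn close_delim (l.getD j "") = true

-- no item of the list opens a group (so neither program ever merges)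
def NoOpener (delim : String) (close_delim : String) (l : List String) : Prop :=
  ∀ i < l.length,
    ¬(PySem.Str.isIn delim (l.getD i "") = true ∧ PySem.Str.isIn close_delim (l.getD i "") = false)

-- Pre_ excludes (a) inputs where an opened group is never closed — there A raises IndexError —
-- and (b) the corner where close_delim contains the joiner ',' and some item opens a group:
-- there A's own ',' joins can fabricate the closing mark inside a merged string, an artefact
-- of the joining, and B may group differently.
def Pre_fix_one_delimiter (mylist : List String) (delim : String) (close_delim : String) : Prop :=
  GoodL delim close_delim mylist ∧
    (PySem.Str.isIn "," close_delim = false ∨ NoOpener delim close_delim mylist)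

instance (mylist : List String) (delim : String) (close_delim : String) :
    Decidable (Pre_fix_one_delimiter mylist delim close_delim) := by
  unfold Pre_fix_one_delimiter GoodL NoOpener; infer_instance

def pvWitness_fix_one_delimiter : List String × String × String := (["[a", "b]", "c"], "[", "]")

def Spec_fix_one_delimiter (mylist : List String) (delim : String) (close_delim : String) (out : List String) : Prop := out = fix_one_delimiter_alt mylist delim close_delim
instance (mylist : List String) (delim : String) (close_delim : String) (out : List String) : Decidable (Spec_fix_one_delimiter mylist delim close_delim out) := by unfold Spec_fix_one_delimiter; infer_instance

-- ===== CLAIM (what is proved, stated in full; the proofs are below) =====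
def Claim_equal_fix_one_delimiter : Prop := ∀ (mylist : List String) (delim : String) (close_delim : String), Dom_fix_one_delimiter mylist delim close_delim → Pre_fix_one_delimiter mylist delim close_delim → Spec_fix_one_delimiter mylist delim close_delim (fix_one_delimiter mylist delim close_delim)

-- ===== LEMMAS AND PROOFS =====

theorem pvWitness_ok :
    Dom_fix_one_delimiter pvWitness_fix_one_delimiter.1 pvWitness_fix_one_delimiter.2.1 pvWitness_fix_one_delimiter.2.2 ∧
    Pre_fix_one_delimiter pvWitness_fix_one_delimiter.1 pvWitness_fix_one_delimiter.2.1 pvWitness_fix_one_delimiter.2.2 := by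
  constructor <;> decide

theorem strAssoc (a b c : String) : a ++ b ++ c = a ++ (b ++ c) := String.append_assoc

theorem toListJoin (a b : String) : (a ++ "," ++ b).toList = a.toList ++ ',' :: b.toList := by simp

-- ---- string infix lemmas: with ',' ∉ close_delim, 'close_delim in (a ++ "," ++ b)' splits ----

theorem prefix_through_mid (t u v : List Char) (c : Char) (hc : c ∉ t)
    (h : t <+: u ++ c :: v) : t <+: u := by
  induction u generalizing t with
  | nil =>
    cases t with
    | nil => exact List.nil_prefix
    | cons a t' =>
      obtain ⟨ha, -⟩ := List.cons_prefix_cons.mp h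
      exact absurd (ha ▸ List.mem_cons_self) hc
  | cons b u' ih =>
    cases t with
    | nil => exact List.nil_prefix
    | cons a t' =>
      obtain ⟨ha, h'⟩ := List.cons_prefix_cons.mp h
      exact List.cons_prefix_cons.mpr ⟨ha, ih t' (fun hm => hc (List.mem_cons_of_mem _ hm)) h'⟩

theorem infix_mid_iff (t u v : List Char) (c : Char) (hc : c ∉ t) :
    t <:+: (u ++ c :: v) ↔ t <:+: u ∨ t <:+: v := by
  constructor
  · rintro ⟨s₁, s₂, he⟩
    have hd : t ++ s₂ = (u ++ c :: v).drop s₁.length := by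
      rw [← he, List.append_assoc, List.drop_left]
    by_cases hle : s₁.length ≤ u.length
    · left
      rw [List.drop_append_of_le_length hle] at hd
      have hp : t <+: u.drop s₁.length ++ c :: v := hd ▸ List.prefix_append t s₂
      exact ((prefix_through_mid t _ v c hc hp).isInfix).trans (List.drop_suffix _ u).isInfix
    · right
      have hd2 : (u ++ c :: v).drop s₁.length = v.drop (s₁.length - (u.length + 1)) := by
        have h1 : u ++ c :: v = (u ++ [c]) ++ v := by simp
        rw [h1, List.drop_append, List.drop_eq_nil_of_le (by simp; omega), List.nil_append]
        congr 1
        simp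
      rw [hd2] at hd
      have hp : t <+: v.drop (s₁.length - (u.length + 1)) := ⟨s₂, hd⟩
      exact (hp.isInfix).trans (List.drop_suffix _ v).isInfix
  · rintro (h | h)
    · exact h.trans (List.prefix_append u (c :: v)).isInfix
    · exact h.trans (show v <:+ u ++ c :: v from ⟨u ++ [c], by simp⟩).isInfix

theorem isIn_split (close_delim a b : String) (hc : PySem.Str.isIn "," close_delim = false) :
    PySem.Str.isIn close_delim (a ++ "," ++ b) =
      (PySem.Str.isIn close_delim a || PySem.Str.isIn close_delim b) := by
  simp only [PySem.Str.isIn_eq] at *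
  have hmem : ',' ∉ close_delim.toList := by
    intro hm
    obtain ⟨s, t, hst⟩ := List.append_of_mem hm
    have : PySem.Chars.isIn (",").toList close_delim.toList = true :=
      (PySem.Chars.isIn_iff_infix _ _).mpr ⟨s, t, by simp [hst]⟩
    rw [hc] at this; exact Bool.false_ne_true this
  have htl : (a ++ "," ++ b).toList = a.toList ++ ',' :: b.toList := by simp
  rw [htl, Bool.eq_iff_iff]
  simp only [Bool.or_eq_true, PySem.Chars.isIn_iff_infix]
  exact infix_mid_iff close_delim.toList a.toList b.toList ',' hmem

-- ---- fixB_merge facts ----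

theorem fixB_merge_length_le (close_delim acc : String) (out : List String) :
    (fixB_merge close_delim acc out).2.length ≤ out.length := by
  fun_induction fixB_merge <;> simp_all <;> omega

-- middle reference form: the natural recursion over suffixes
def fixRec (delim : String) (close_delim : String) (l : List String) : List String :=
  match l with
  | [] => []
  | x :: rest =>
    if PySem.Str.isIn delim x && !PySem.Str.isIn close_delim x then
      (fixB_merge close_delim x rest).1 :: fixRec delim close_delim (fixB_merge close_delim x rest).2
    else x :: fixRec delim close_delim rest
termination_by l.length
decreasing_by
  · have := fixB_merge_length_le close_delim x rest; simp; omega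
  · simp

-- prepending an already-close-free accumulator commutes with the merge
theorem fixB_merge_prepend (close_delim acc b : String) (out : List String)
    (hc : PySem.Str.isIn "," close_delim = false)
    (ha : PySem.Str.isIn close_delim acc = false) :
    fixB_merge close_delim (acc ++ "," ++ b) out =
      ((acc ++ "," ++ (fixB_merge close_delim b out).1), (fixB_merge close_delim b out).2) := by
  induction out generalizing b with
  | nil =>
    have hsplit := isIn_split close_delim acc b hc
    rw [ha, Bool.false_or] at hsplit
    simp only [PySem.Str.isIn_eq] at hsplit
    rw [fixB_merge, fixB_merge]
    simp only [PySem.Str.isIn_eq, hsplit]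
    split <;> simp
  | cons g r ih =>
    have hsplit := isIn_split close_delim acc b hc
    rw [ha, Bool.false_or] at hsplit
    simp only [PySem.Str.isIn_eq] at hsplit
    rw [fixB_merge]
    conv_rhs => rw [fixB_merge]
    simp only [PySem.Str.isIn_eq, hsplit]
    split
    case isTrue => simp
    case isFalse =>
      rw [strAssoc (acc ++ ",") b ",", strAssoc (acc ++ ",") (b ++ ",") g]
      exact ih (b ++ "," ++ g)

-- if some raw piece contains close_delim, the merged accumulator does
theorem fixB_merge_closes (close_delim acc : String) (out : List String)
    (hc : PySem.Str.isIn "," close_delim = false)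
    (h : PySem.Str.isIn close_delim acc = true ∨
         ∃ j < out.length, PySem.Str.isIn close_delim (out.getD j "") = true) :
    PySem.Str.isIn close_delim (fixB_merge close_delim acc out).1 = true := by
  induction out generalizing acc with
  | nil =>
    have hT : PySem.Str.isIn close_delim acc = true := by
      rcases h with h | ⟨j, hj, -⟩
      · exact h
      · simp at hj
    rw [fixB_merge]
    simp only [PySem.Str.isIn_eq] at hT ⊢
    simp [hT]
  | cons g r ih =>
    cases hacc : PySem.Str.isIn close_delim acc
    · have hacc' := hacc; simp only [PySem.Str.isIn_eq] at hacc'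
      rw [fixB_merge]
      simp only [PySem.Str.isIn_eq, hacc', Bool.false_eq_true, if_false]
      apply ih
      rcases h with h | ⟨j, hj, hjc⟩
      · rw [hacc] at h; exact absurd h Bool.false_ne_true
      · cases j with
        | zero =>
          left
          rw [isIn_split close_delim acc g hc, hacc, Bool.false_or]
          simpa using hjc
        | succ j' => right; exact ⟨j', by simpa using hj, by simpa using hjc⟩
    · have hacc' := hacc; simp only [PySem.Str.isIn_eq] at hacc'
      rw [fixB_merge]
      simp only [PySem.Str.isIn_eq, hacc', if_true]

-- ---- GoodL bookkeeping ----

theorem GoodL_tail (delim close_delim : String) (x : String) (rest : List String)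
    (h : GoodL delim close_delim (x :: rest)) : GoodL delim close_delim rest := by
  intro i hi hop
  obtain ⟨j, hj, hij, hjc⟩ := h (i + 1) (by simpa using Nat.succ_lt_succ hi) (by simpa using hop)
  cases j with
  | zero => omega
  | succ j' => exact ⟨j', by simpa using hj, by omega, by simpa using hjc⟩

theorem GoodL_closes (delim close_delim : String) (x : String) (rest : List String)
    (h : GoodL delim close_delim (x :: rest))
    (hop : PySem.Str.isIn delim x = true ∧ PySem.Str.isIn close_delim x = false) :
    ∃ j < rest.length, PySem.Str.isIn close_delim (rest.getD j "") = true := by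
  obtain ⟨j, hj, hij, hjc⟩ := h 0 (by simp) (by simpa using hop)
  cases j with
  | zero => omega
  | succ j' => exact ⟨j', by simpa using hj, by simpa using hjc⟩

-- ---- merging into the processed list = merging raw, then processing the remainder ----

theorem merge_fixRec (delim close_delim : String) (l : List String) (acc : String)
    (hc : PySem.Str.isIn "," close_delim = false)
    (hg : GoodL delim close_delim l)
    (hcl : ∃ j < l.length, PySem.Str.isIn close_delim (l.getD j "") = true) :
    fixB_merge close_delim acc (fixRec delim close_delim l) =
      ((fixB_merge close_delim acc l).1,
        fixRec delim close_delim (fixB_merge close_delim acc l).2) := by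
  induction l generalizing acc with
  | nil => obtain ⟨j, hj, -⟩ := hcl; simp at hj
  | cons x rest ih =>
    cases hacc : PySem.Str.isIn close_delim acc
    case true =>
      have hacc' := hacc; simp only [PySem.Str.isIn_eq] at hacc'
      rw [fixB_merge.eq_def]
      conv_rhs => rw [fixB_merge.eq_def]
      simp [PySem.Str.isIn_eq, hacc']
    case false =>
    have hacc' := hacc; simp only [PySem.Str.isIn_eq] at hacc'
    cases hop : PySem.Str.isIn delim x && !PySem.Str.isIn close_delim x
    case false =>
      -- x is not an opener
      rw [fixRec]
      simp only [hop, Bool.false_eq_true, if_false]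
      cases hx : PySem.Str.isIn close_delim x
      case true =>
        -- merge stops right after absorbing x, on both sides
        have hstep : PySem.Str.isIn close_delim (acc ++ "," ++ x) = true := by
          rw [isIn_split close_delim acc x hc, hacc, hx]; rfl
        simp only [PySem.Str.isIn_eq] at hstep
        rw [toListJoin] at hstep
        rw [fixB_merge]
        conv_rhs => rw [fixB_merge]
        simp only [PySem.Str.isIn_eq, hacc', Bool.false_eq_true, if_false]
        rw [fixB_merge.eq_def]
        conv_rhs => rw [fixB_merge.eq_def]
        simp [hstep]
      case false =>
        have hstep : PySem.Str.isIn close_delim (acc ++ "," ++ x) = false := by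
          rw [isIn_split close_delim acc x hc, hacc, hx]; rfl
        have hcl' : ∃ j < rest.length, PySem.Str.isIn close_delim (rest.getD j "") = true := by
          obtain ⟨j, hj, hjc⟩ := hcl
          cases j with
          | zero => rw [show (x :: rest).getD 0 "" = x from rfl, hx] at hjc; exact absurd hjc Bool.false_ne_true
          | succ j' => exact ⟨j', by simpa using hj, by simpa using hjc⟩
        rw [fixB_merge]
        conv_rhs => rw [fixB_merge]
        simp only [PySem.Str.isIn_eq, hacc', Bool.false_eq_true, if_false]
        exact ih (acc ++ "," ++ x) (GoodL_tail _ _ _ _ hg) hcl'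
    case true =>
      -- x opens a group; by GoodL it is closed inside rest
      have hopx : PySem.Str.isIn delim x = true ∧ PySem.Str.isIn close_delim x = false := by
        simpa only [Bool.and_eq_true, Bool.not_eq_true'] using hop
      have hclrest := GoodL_closes delim close_delim x rest hg hopx
      have hgclose : PySem.Str.isIn close_delim (fixB_merge close_delim x rest).1 = true :=
        fixB_merge_closes close_delim x rest hc (Or.inr hclrest)
      have hstep : PySem.Str.isIn close_delim (acc ++ "," ++ (fixB_merge close_delim x rest).1) = true := by
        rw [isIn_split _ _ _ hc, hgclose]; simp
      rw [fixRec]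
      simp only [hop, if_true]
      -- LHS: absorb the whole first group head, then stop
      rw [fixB_merge]
      simp only [PySem.Str.isIn_eq, hacc', Bool.false_eq_true, if_false]
      rw [fixB_merge.eq_def]
      simp only [hstep, if_true]
      -- RHS: raw merge = acc-prepended group merge
      conv_rhs => rw [fixB_merge]
      simp only [PySem.Str.isIn_eq, hacc', Bool.false_eq_true, if_false]
      rw [fixB_merge_prepend close_delim acc x rest hc hacc]

-- ---- B = fixRec under Pre_ ----

theorem alt_eq_fixRec (delim close_delim : String) (l : List String)
    (hc : PySem.Str.isIn "," close_delim = false)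
    (hg : GoodL delim close_delim l) :
    fix_one_delimiter_alt l delim close_delim = fixRec delim close_delim l := by
  induction l with
  | nil => rw [fix_one_delimiter_alt, fixRec]; rfl
  | cons x rest ih =>
    have hrest := ih (GoodL_tail _ _ _ _ hg)
    rw [fix_one_delimiter_alt, List.foldr_cons,
      show (List.foldr _ [] rest : List String) = fix_one_delimiter_alt rest delim close_delim from rfl,
      hrest, fixRec]
    cases hop : PySem.Str.isIn delim x && !PySem.Str.isIn close_delim x
    case false => simp [hop]
    case true =>
      simp only [hop, if_true]
      have hopx : PySem.Str.isIn delim x = true ∧ PySem.Str.isIn close_delim x = false := by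
        simpa only [Bool.and_eq_true, Bool.not_eq_true'] using hop
      rw [merge_fixRec delim close_delim rest x hc (GoodL_tail _ _ _ _ hg)
        (GoodL_closes delim close_delim x rest hg hopx)]

-- ---- A = fixRec (pure index bookkeeping, no precondition needed) ----

theorem merge_AB (mylist : List String) (close_delim : String) (item : String) (i : Nat) :
    (fixA_merge mylist close_delim item i).1 = (fixB_merge close_delim item (mylist.drop (i+1))).1 ∧
    (fixB_merge close_delim item (mylist.drop (i+1))).2 =
      mylist.drop ((fixA_merge mylist close_delim item i).2 + 1) := by
  fun_induction fixA_merge with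
  | case1 item i h =>
    simp only [PySem.Str.isIn_eq] at h
    rw [fixB_merge.eq_def]
    simp [h]
  | case2 item i hnc h ih =>
    have hnc' : PySem.Chars.isIn close_delim.toList item.toList = false := by
      simp only [PySem.Str.isIn_eq, Bool.not_eq_true] at hnc
      exact hnc
    have hdrop : mylist.drop (i+1) = mylist[i+1] :: mylist.drop (i+2) := List.drop_eq_getElem_cons h
    rw [hdrop, fixB_merge.eq_def]
    simp only [PySem.Str.isIn_eq, hnc', Bool.false_eq_true, if_false]
    exact ih
  | case3 item i hnc h =>
    have hnc' : PySem.Chars.isIn close_delim.toList item.toList = false := by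
      simp only [PySem.Str.isIn_eq, Bool.not_eq_true] at hnc
      exact hnc
    have hdrop : mylist.drop (i+1) = ([] : List String) := List.drop_eq_nil_of_le (by omega)
    rw [hdrop, fixB_merge.eq_def]
    simp only [PySem.Str.isIn_eq, hnc', Bool.false_eq_true, if_false]
    exact ⟨trivial, (List.drop_eq_nil_of_le (by omega)).symm⟩

theorem loopA_eq (mylist : List String) (delim close_delim : String) (i : Nat) (out : List String) :
    fixA_loop mylist delim close_delim i out = out ++ fixRec delim close_delim (mylist.drop i) := by
  fun_induction fixA_loop with
  | case1 i out h hop ih =>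
    -- opener branch
    have hAB := merge_AB mylist close_delim mylist[i] i
    rw [ih]
    have hdrop : mylist.drop i = mylist[i] :: mylist.drop (i+1) := List.drop_eq_getElem_cons h
    rw [hdrop, fixRec]
    simp only [hop, if_true]
    rw [← hAB.1, hAB.2]
    simp
  | case2 i out h hop ih =>
    rw [ih]
    have hdrop : mylist.drop i = mylist[i] :: mylist.drop (i+1) := List.drop_eq_getElem_cons h
    rw [hdrop, fixRec]
    have hop' : (PySem.Str.isIn delim mylist[i] && !PySem.Str.isIn close_delim mylist[i]) = false := by
      simpa using hop
    simp only [hop', Bool.false_eq_true, if_false]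
    simp
  | case3 i out h =>
    rw [List.drop_eq_nil_of_le (by omega), fixRec]
    simp

-- ---- the NoOpener branch: neither program ever merges ----

theorem NoOpener_get (delim close_delim : String) (l : List String) (h : NoOpener delim close_delim l)
    (i : Nat) (hi : i < l.length) :
    (PySem.Str.isIn delim l[i] && !PySem.Str.isIn close_delim l[i]) = false := by
  have := h i hi
  rw [List.getD_eq_getElem l "" hi] at this
  cases h1 : PySem.Str.isIn delim l[i] <;> cases h2 : PySem.Str.isIn close_delim l[i] <;>
    simp_all

theorem NoOpener_tail (delim close_delim : String) (x : String) (rest : List String)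
    (h : NoOpener delim close_delim (x :: rest)) : NoOpener delim close_delim rest := by
  intro i hi
  exact fun hc => h (i + 1) (by simpa using Nat.succ_lt_succ hi) (by simpa using hc)

theorem loopA_id (mylist : List String) (delim close_delim : String) (i : Nat) (out : List String)
    (h : NoOpener delim close_delim mylist) :
    fixA_loop mylist delim close_delim i out = out ++ mylist.drop i := by
  fun_induction fixA_loop with
  | case1 i out hlt hop ih =>
    exact absurd hop (by rw [NoOpener_get delim close_delim mylist h i hlt]; simp)
  | case2 i out hlt hop ih =>
    rw [ih, List.drop_eq_getElem_cons hlt]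
    simp
  | case3 i out hlt =>
    rw [List.drop_eq_nil_of_le (by omega)]
    simp

theorem alt_id (delim close_delim : String) (l : List String)
    (h : NoOpener delim close_delim l) :
    fix_one_delimiter_alt l delim close_delim = l := by
  induction l with
  | nil => rfl
  | cons x rest ih =>
    have hx : (PySem.Str.isIn delim x && !PySem.Str.isIn close_delim x) = false :=
      NoOpener_get delim close_delim (x :: rest) h 0 (by simp)
    rw [fix_one_delimiter_alt, List.foldr_cons,
      show (List.foldr _ [] rest : List String) = fix_one_delimiter_alt rest delim close_delim from rfl,
      ih (NoOpener_tail delim close_delim x rest h)]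
    rw [if_neg (by rw [hx]; simp)]

-- ===== VERDICT (by name: the statement is the Claim_ definition above) =====
theorem fix_one_delimiter_spec : Claim_equal_fix_one_delimiter := by
  intro mylist delim close_delim _hdom hpre
  unfold Spec_fix_one_delimiter
  rcases hpre with ⟨hg, hcomma | hno⟩
  · rw [fix_one_delimiter, loopA_eq, List.drop_zero,
      alt_eq_fixRec delim close_delim mylist hcomma hg]
    rfl
  · rw [fix_one_delimiter, loopA_id mylist delim close_delim 0 [] hno, List.drop_zero,
      alt_id delim close_delim mylist hno]
    rfl
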